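-- pv_equiv track=rewrite | github.com/Elking-jpg/Proyecto_Buscaminas | tests.py | contar_minas
-- ===== SOURCE A (Python) =====
-- def contar_minas (tablero:list[list[int]]) -> tuple[int,int]:
--     res:tuple[int,int] = (0,0)
--     for fila in tablero:
--         for x in fila:
--             if x == -1:
--                 res = (res[0] + 1, res[1])
--             elif x == 0:
--                 res = (res[0], res[1] + 1)
--     return res
-- ===== SOURCE B (Python) =====
-- def contar_minas(tablero: list[list[int]]) -> tuple[int, int]:
--     celdas = [x for fila in tablero for x in fila]
--     return (celdas.count(-1), celdas.count(0))
-- ===== Notes on version B (the rewrite author's own statement) =====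
-- stated objective: idiomatic
-- what changed: Replaces the per-cell if/elif branching with a running tuple accumulator by flattening the grid once and taking two list.count tabulations for -1 and 0.
import Mathlib
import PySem

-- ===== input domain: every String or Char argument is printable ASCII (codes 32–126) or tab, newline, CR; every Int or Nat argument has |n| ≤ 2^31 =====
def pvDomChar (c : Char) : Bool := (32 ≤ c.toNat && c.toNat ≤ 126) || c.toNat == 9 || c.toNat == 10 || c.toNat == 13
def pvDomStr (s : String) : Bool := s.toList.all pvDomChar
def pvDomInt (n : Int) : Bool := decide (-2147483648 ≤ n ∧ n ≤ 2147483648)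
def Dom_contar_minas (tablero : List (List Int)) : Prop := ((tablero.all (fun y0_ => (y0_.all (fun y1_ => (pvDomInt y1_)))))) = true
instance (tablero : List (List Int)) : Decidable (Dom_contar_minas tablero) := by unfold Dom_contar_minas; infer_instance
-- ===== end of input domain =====

-- B flattens the grid once and counts -1 and 0 with list.count instead of A's per-cell if/elif accumulator (idiomatic; same cost).

-- ===== PORT A =====
def contar_minas (tablero : List (List Int)) : Int × Int :=
  tablero.foldl (fun res fila =>
    fila.foldl (fun res x =>
      if x = -1 then (res.1 + 1, res.2)
      else if x = 0 then (res.1, res.2 + 1)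
      else res) res) (0, 0)

-- ===== PORT B =====
def contar_minas_alt (tablero : List (List Int)) : Int × Int :=
  let celdas := tablero.flatMap (fun fila => fila)
  (PySem.List.count celdas (-1), PySem.List.count celdas 0)

-- ===== PRECONDITION & SPEC =====
def Spec_contar_minas (tablero : List (List Int)) (out : Int × Int) : Prop := out = contar_minas_alt tablero
instance (tablero : List (List Int)) (out : Int × Int) : Decidable (Spec_contar_minas tablero out) := by unfold Spec_contar_minas; infer_instance

-- ===== CLAIM (what is proved, stated in full; the proofs are below) =====
def Claim_equal_contar_minas : Prop := ∀ (tablero : List (List Int)), Dom_contar_minas tablero → Spec_contar_minas tablero (contar_minas tablero)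

-- ===== LEMMAS AND PROOFS =====
theorem contar_inner (fila : List Int) (res : Int × Int) :
    fila.foldl (fun res x =>
      if x = -1 then (res.1 + 1, res.2)
      else if x = 0 then (res.1, res.2 + 1)
      else res) res
    = (res.1 + PySem.List.count fila (-1), res.2 + PySem.List.count fila 0) := by
  induction fila generalizing res with
  | nil => simp [PySem.List.count]
  | cons x xs ih =>
    simp only [List.foldl_cons, ih, PySem.List.count, List.count_cons]
    split_ifs with h1 h2 <;> simp_all <;> ring

theorem contar_outer (tablero : List (List Int)) (res : Int × Int) :
    tablero.foldl (fun res fila =>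
      fila.foldl (fun res x =>
        if x = -1 then (res.1 + 1, res.2)
        else if x = 0 then (res.1, res.2 + 1)
        else res) res) res
    = (res.1 + PySem.List.count (tablero.flatMap (fun fila => fila)) (-1),
       res.2 + PySem.List.count (tablero.flatMap (fun fila => fila)) 0) := by
  induction tablero generalizing res with
  | nil => simp [PySem.List.count]
  | cons fila rest ih =>
    rw [List.foldl_cons, contar_inner, ih]
    simp only [List.flatMap_cons, PySem.List.count, List.count_append, Prod.mk.injEq]
    push_cast
    constructor <;> ring

-- ===== VERDICT (by name: the statement is the Claim_ definition above) =====
theorem contar_minas_spec : Claim_equal_contar_minas := by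
  intro tablero _
  unfold Spec_contar_minas contar_minas contar_minas_alt
  simp [contar_outer]
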